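-- pv_equiv track=rewrite | github.com/kashmoney1/Python-Code | PythonPractice.py | caught_speeding
-- ===== SOURCE A (Python) =====
-- def caught_speeding(speed, is_birthday):
--     while not is_birthday:
--         if speed <= 60:
--             return 0
--         elif 61 <= speed <= 80:
--             return 1
--         else:
--             if speed >= 81:
--                 return 2
--     return caught_speeding(speed - 5, False)
-- ===== SOURCE B (Python) =====
-- def caught_speeding(speed, is_birthday):
--     effective = speed - 5 if is_birthday else speed
--     if effective <= 60:
--         return 0
--     elif effective <= 80:
--         return 1
--     else:
--         return 2
-- ===== Notes on version B (the rewrite author's own statement) =====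
-- stated objective: simpler
-- what changed: Replaces A's while-not loop and single-step recursive call with one inline birthday adjustment followed by a flat if/elif/else on the adjusted speed.
import Mathlib
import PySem

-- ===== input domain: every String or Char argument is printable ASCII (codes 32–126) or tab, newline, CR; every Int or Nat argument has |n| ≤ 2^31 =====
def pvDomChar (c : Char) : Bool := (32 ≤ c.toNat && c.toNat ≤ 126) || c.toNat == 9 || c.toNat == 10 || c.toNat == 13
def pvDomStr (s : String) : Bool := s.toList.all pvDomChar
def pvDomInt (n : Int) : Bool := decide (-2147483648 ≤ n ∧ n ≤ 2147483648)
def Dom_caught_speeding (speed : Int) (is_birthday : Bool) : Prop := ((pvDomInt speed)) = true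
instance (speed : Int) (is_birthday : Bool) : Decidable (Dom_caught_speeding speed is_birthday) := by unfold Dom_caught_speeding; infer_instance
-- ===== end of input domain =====

-- ===== PORT A =====
-- while not is_birthday: classify; out of the loop: recurse once with (speed-5, False)
def caught_speeding (speed : Int) (is_birthday : Bool) : Int :=
  if ¬ is_birthday then
    if speed ≤ 60 then 0
    else if 61 ≤ speed ∧ speed ≤ 80 then 1
    else 2   -- speed ≥ 81 always holds here for Ints
  else
    -- recursive call caught_speeding (speed - 5) false, inlined one level (is_birthday = false)
    if speed - 5 ≤ 60 then 0
    else if 61 ≤ speed - 5 ∧ speed - 5 ≤ 80 then 1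
    else 2

-- ===== PORT B =====
def caught_speeding_alt (speed : Int) (is_birthday : Bool) : Int :=
  let effective := if is_birthday then speed - 5 else speed
  if effective ≤ 60 then 0
  else if effective ≤ 80 then 1
  else 2

-- ===== PRECONDITION & SPEC =====
def Spec_caught_speeding (speed : Int) (is_birthday : Bool) (out : Int) : Prop := out = caught_speeding_alt speed is_birthday
instance (speed : Int) (is_birthday : Bool) (out : Int) : Decidable (Spec_caught_speeding speed is_birthday out) := by unfold Spec_caught_speeding; infer_instance

-- ===== CLAIM (what is proved, stated in full; the proofs are below) =====
def Claim_equal_caught_speeding : Prop := ∀ (speed : Int) (is_birthday : Bool), Dom_caught_speeding speed is_birthday → Spec_caught_speeding speed is_birthday (caught_speeding speed is_birthday)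

-- ===== LEMMAS AND PROOFS =====

-- ===== VERDICT (by name: the statement is the Claim_ definition above) =====
theorem caught_speeding_spec : Claim_equal_caught_speeding := by
  intro speed is_birthday _
  unfold Spec_caught_speeding caught_speeding caught_speeding_alt
  cases is_birthday <;> simp <;> split_ifs <;> omega
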